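-- pv_equiv track=rewrite | github.com/3D-FRONT-FUTURE/3D-FRONT-ToolBox | Room/Preprocess/src/floor_tool.py | find_top_point
-- ===== SOURCE A (Python) =====
-- def find_top_point(line_list):
--     """find the top point
--
--     Returns:
--         [x1, y1] -- coordinate of one of top point
--     """
--
--     top_point = []
--     # find the top line, one
--     x_list = []
--     z_list = []
--     for line in line_list:
--         x_list.append(line[0][0])
--         x_list.append(line[1][0])
--         z_list.append(line[0][1])
--         z_list.append(line[1][1])
--
--     max_z = max(z_list)
--     # num_max_z = z_list.count(max_z)
--     index_max_z = z_list.index(max_z)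
--     top_point = [x_list[index_max_z], z_list[index_max_z]]
--
--     return top_point
-- ===== SOURCE B (Python) =====
-- def find_top_point(line_list):
--     """find the top point (single pass, no intermediate lists)
--
--     Returns:
--         [x1, y1] -- coordinate of one of top point
--     """
--     best_x = None
--     best_z = None
--     for line in line_list:
--         for pt in (line[0], line[1]):
--             z = pt[1]
--             if best_z is None or z > best_z:
--                 best_z = z
--                 best_x = pt[0]
--     if best_z is None:
--         raise ValueError("max() arg is an empty sequence")
--     return [best_x, best_z]
-- ===== Notes on version B (the rewrite author's own statement) =====
-- stated objective: simpler
-- what changed: Replaced the two accumulated x/z lists plus max()/index()/lookup passes with a single fused loop keeping the running best (x, z) pair, strict '>' preserving the first-maximum tie-break.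
-- outside the precondition, e.g. on find_top_point([]): A raises ValueError, B raises ValueError
import Mathlib
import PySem

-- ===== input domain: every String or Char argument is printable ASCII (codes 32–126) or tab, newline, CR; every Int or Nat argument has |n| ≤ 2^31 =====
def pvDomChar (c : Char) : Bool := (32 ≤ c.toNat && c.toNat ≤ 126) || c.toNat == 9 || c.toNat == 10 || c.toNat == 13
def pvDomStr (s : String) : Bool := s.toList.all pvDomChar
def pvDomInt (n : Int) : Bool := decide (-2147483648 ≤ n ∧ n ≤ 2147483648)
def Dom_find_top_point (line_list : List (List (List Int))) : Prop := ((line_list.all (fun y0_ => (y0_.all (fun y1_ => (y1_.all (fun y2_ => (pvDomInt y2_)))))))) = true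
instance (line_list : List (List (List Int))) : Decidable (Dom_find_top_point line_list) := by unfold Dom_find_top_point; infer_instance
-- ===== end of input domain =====

-- B replaces A's two accumulated x/z lists plus max()/index()/lookup with one fused
-- loop keeping the running best (x, z) pair (strict '>' keeps the first-max tie-break);
-- objective: simpler (same O(n), no temporary lists).

-- ===== PORT A =====
-- the loop: for line in line_list: x_list += [line[0][0], line[1][0]]; z_list += [line[0][1], line[1][1]]
-- (pyGet? 'none' = IndexError; the fallback 'acc' is reached only outside Pre_)
def buildLists (line_list : List (List (List Int))) : List Int × List Int :=
  line_list.foldl (fun acc line =>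
    match PySem.List.pyGet? line 0, PySem.List.pyGet? line 1 with
    | some p0, some p1 =>
      match PySem.List.pyGet? p0 0, PySem.List.pyGet? p1 0,
            PySem.List.pyGet? p0 1, PySem.List.pyGet? p1 1 with
      | some x0, some x1, some z0, some z1 => (acc.1 ++ [x0, x1], acc.2 ++ [z0, z1])
      | _, _, _, _ => acc
    | _, _ => acc) ([], [])

def find_top_point (line_list : List (List (List Int))) : List Int :=
  let lists := buildLists line_list
  let x_list := lists.1
  let z_list := lists.2
  match PySem.List.max? z_list (fun z => z) with  -- max([]) = ValueError, outside Pre_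
  | none => []
  | some max_z =>
    match PySem.List.index? z_list max_z with
    | none => []
    | some index_max_z =>
      match PySem.List.pyGet? x_list (index_max_z : Int),
            PySem.List.pyGet? z_list (index_max_z : Int) with
      | some x, some z => [x, z]
      | _, _ => []

-- ===== PORT B =====
-- one candidate point: if best is unset or pt[1] > best z, take (pt[0], pt[1])
def altStep (best : Option (Int × Int)) (pt : List Int) : Option (Int × Int) :=
  match PySem.List.pyGet? pt 1, PySem.List.pyGet? pt 0 with
  | some z, some x =>
    match best with
    | none => some (x, z)
    | some (bx, bz) => if bz < z then some (x, z) else some (bx, bz)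
  | _, _ => best

def find_top_point_alt (line_list : List (List (List Int))) : List Int :=
  let best := line_list.foldl (fun b line =>
    match PySem.List.pyGet? line 0, PySem.List.pyGet? line 1 with
    | some p0, some p1 => altStep (altStep b p0) p1
    | _, _ => b) none
  match best with
  | none => []  -- ValueError on empty input, outside Pre_
  | some q => [q.1, q.2]

-- ===== PRECONDITION & SPEC =====
-- Pre_ excludes exactly the inputs where A raises: the empty list (ValueError from max([]))
-- and lines whose first two members, or their first two coordinates, are missing (IndexError).
def Pre_find_top_point (line_list : List (List (List Int))) : Prop :=
  line_list ≠ [] ∧ ∀ line ∈ line_list,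
    2 ≤ line.length ∧ 2 ≤ (line.getD 0 []).length ∧ 2 ≤ (line.getD 1 []).length

instance (line_list : List (List (List Int))) : Decidable (Pre_find_top_point line_list) := by
  unfold Pre_find_top_point; infer_instance

def pvWitness_find_top_point : List (List (List Int)) := [[[0, 5], [1, 2]], [[3, 5], [4, -1]]]

def Spec_find_top_point (line_list : List (List (List Int))) (out : List Int) : Prop := out = find_top_point_alt line_list
instance (line_list : List (List (List Int))) (out : List Int) : Decidable (Spec_find_top_point line_list out) := by unfold Spec_find_top_point; infer_instance

-- ===== CLAIM (what is proved, stated in full; the proofs are below) =====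
def Claim_equal_find_top_point : Prop := ∀ (line_list : List (List (List Int))), Dom_find_top_point line_list → Pre_find_top_point line_list → Spec_find_top_point line_list (find_top_point line_list)

-- ===== LEMMAS AND PROOFS =====

-- the (x, z) pair of a point, and the two endpoint pairs of a line (total versions,
-- equal to the ports' reads under Pre_)
def pairOf (pt : List Int) : Int × Int := (pt.getD 0 0, pt.getD 1 0)

def pairsOf (line : List (List Int)) : List (Int × Int) :=
  [pairOf (line.getD 0 []), pairOf (line.getD 1 [])]

-- total version of altStep
def altStep' (b : Option (Int × Int)) (p : Int × Int) : Option (Int × Int) :=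
  match b with
  | none => some p
  | some (bx, bz) => if bz < p.2 then some p else some (bx, bz)

-- first maximal pair (by z) of a pair list
def gBest : List (Int × Int) → Option (Int × Int)
  | [] => none
  | p :: ps =>
    some (match gBest ps with
          | none => p
          | some q => if p.2 < q.2 then q else p)


-- the flattened list of (x, z) endpoint pairs both programs traverse
def pairsList (line_list : List (List (List Int))) : List (Int × Int) :=
  line_list.flatMap pairsOf

-- reading the first two elements of a list of length ≥ 2 never raises
lemma get2 {α : Type} (l : List α) (d : α) (h : 2 ≤ l.length) :
    PySem.List.pyGet? l (0 : Int) = some (l.getD 0 d) ∧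
    PySem.List.pyGet? l (1 : Int) = some (l.getD 1 d) := by
  match l, h with
  | a :: b :: t, _ =>
    refine ⟨?_, ?_⟩
    · rw [show (0 : Int) = ((0 : Nat) : Int) from rfl, PySem.List.pyGet?_natCast]
      simp [List.getD]
    · rw [show (1 : Int) = ((1 : Nat) : Int) from rfl, PySem.List.pyGet?_natCast]
      simp [List.getD]

lemma gBest_eq_none_iff (ps : List (Int × Int)) : gBest ps = none ↔ ps = [] := by
  cases ps <;> simp [gBest]

-- A's list-building loop, under Pre_, produces the x- and z-projections of pairsList
lemma buildLists_go (line_list : List (List (List Int))) : ∀ acc : List Int × List Int,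
    (∀ line ∈ line_list, 2 ≤ line.length ∧ 2 ≤ (line.getD 0 []).length ∧ 2 ≤ (line.getD 1 []).length) →
    line_list.foldl (fun acc line =>
      match PySem.List.pyGet? line 0, PySem.List.pyGet? line 1 with
      | some p0, some p1 =>
        match PySem.List.pyGet? p0 0, PySem.List.pyGet? p1 0,
              PySem.List.pyGet? p0 1, PySem.List.pyGet? p1 1 with
        | some x0, some x1, some z0, some z1 => (acc.1 ++ [x0, x1], acc.2 ++ [z0, z1])
        | _, _, _, _ => acc
      | _, _ => acc) acc
    = (acc.1 ++ (pairsList line_list).map Prod.fst, acc.2 ++ (pairsList line_list).map Prod.snd) := by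
  induction line_list with
  | nil => intro acc _; simp [pairsList]
  | cons l t ih =>
    intro acc h
    obtain ⟨hl, h0, h1⟩ := h l (List.mem_cons_self ..)
    rw [List.foldl_cons]
    simp only [(get2 l [] hl).1, (get2 l [] hl).2,
      (get2 _ (0 : Int) h0).1, (get2 _ (0 : Int) h1).1,
      (get2 _ (0 : Int) h0).2, (get2 _ (0 : Int) h1).2]
    rw [ih _ (fun line hline => h line (List.mem_cons_of_mem _ hline))]
    simp [pairsList, pairsOf, pairOf]

lemma buildLists_eq (line_list : List (List (List Int)))
    (h : ∀ line ∈ line_list, 2 ≤ line.length ∧ 2 ≤ (line.getD 0 []).length ∧ 2 ≤ (line.getD 1 []).length) :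
    buildLists line_list =
      ((pairsList line_list).map Prod.fst, (pairsList line_list).map Prod.snd) := by
  rw [buildLists, buildLists_go line_list ([], []) h]
  simp

-- B's fused loop, under Pre_, is the fold of the total step over pairsList
lemma altFold_eq (line_list : List (List (List Int))) : ∀ b : Option (Int × Int),
    (∀ line ∈ line_list, 2 ≤ line.length ∧ 2 ≤ (line.getD 0 []).length ∧ 2 ≤ (line.getD 1 []).length) →
    line_list.foldl (fun b line =>
      match PySem.List.pyGet? line 0, PySem.List.pyGet? line 1 with
      | some p0, some p1 => altStep (altStep b p0) p1
      | _, _ => b) b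
    = (pairsList line_list).foldl altStep' b := by
  have hstep : ∀ (b : Option (Int × Int)) (p : List Int), 2 ≤ p.length →
      altStep b p = altStep' b (pairOf p) := by
    intro b p hp
    rw [altStep, (get2 p (0 : Int) hp).1, (get2 p (0 : Int) hp).2]
    cases b with
    | none => rfl
    | some q => rfl
  induction line_list with
  | nil => intro b _; simp [pairsList]
  | cons l t ih =>
    intro b h
    obtain ⟨hl, h0, h1⟩ := h l (List.mem_cons_self ..)
    rw [List.foldl_cons]
    simp only [(get2 l [] hl).1, (get2 l [] hl).2]
    rw [ih _ (fun line hline => h line (List.mem_cons_of_mem _ hline))]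
    simp only [pairsList, List.flatMap_cons, List.foldl_append, pairsOf, List.foldl_cons,
      List.foldl_nil, hstep _ _ h0, hstep _ _ h1]

-- fold of altStep' in terms of gBest
def comb (b r : Option (Int × Int)) : Option (Int × Int) :=
  match r with
  | none => b
  | some q => altStep' b q

lemma foldl_altStep' (ps : List (Int × Int)) : ∀ b, ps.foldl altStep' b = comb b (gBest ps) := by
  induction ps with
  | nil => intro b; rfl
  | cons p ps ih =>
    intro b
    rw [List.foldl_cons, ih]
    cases hg : gBest ps with
    | none => simp [gBest, hg, comb]
    | some q =>
      simp only [gBest, hg, comb]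
      obtain ⟨px, pz⟩ := p
      obtain ⟨qx, qz⟩ := q
      cases b with
      | none => simp only [altStep']; split_ifs <;> simp_all
      | some b' =>
        obtain ⟨bx, bz⟩ := b'
        simp only [altStep']
        split_ifs <;> simp_all <;> omega

-- gBest picks the first pair with maximal z
lemma gBest_spec (ps : List (Int × Int)) : ∀ q, gBest ps = some q →
    ∃ pre suf, ps = pre ++ q :: suf ∧ (∀ r ∈ pre, r.2 < q.2) ∧ (∀ r ∈ suf, r.2 ≤ q.2) := by
  induction ps with
  | nil => intro q h; simp [gBest] at h
  | cons p ps ih =>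
    intro q h
    cases hg : gBest ps with
    | none =>
      have hnil := (gBest_eq_none_iff ps).1 hg
      subst hnil
      simp [gBest] at h
      exact ⟨[], [], by simp [h], by simp, by simp⟩
    | some q' =>
      simp only [gBest, hg, Option.some.injEq] at h
      by_cases hlt : p.2 < q'.2
      · rw [if_pos hlt] at h
        subst h
        obtain ⟨pre, suf, hps, hpre, hsuf⟩ := ih q' hg
        exact ⟨p :: pre, suf, by simp [hps], by
          intro r hr
          rcases List.mem_cons.1 hr with rfl | hr
          · exact hlt
          · exact hpre r hr, hsuf⟩
      · rw [if_neg hlt] at h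
        subst h
        refine ⟨[], ps, by simp, by simp, ?_⟩
        intro r hr
        obtain ⟨pre, suf, hps, hpre, hsuf⟩ := ih q' hg
        rw [hps] at hr
        rcases List.mem_append.1 hr with hr | hr
        · exact le_of_lt (lt_of_lt_of_le (hpre r hr) (by omega))
        · rcases List.mem_cons.1 hr with rfl | hr
          · omega
          · exact le_trans (hsuf r hr) (by omega)

-- ===== VERDICT (by name: the statement is the Claim_ definition above) =====
theorem find_top_point_spec : Claim_equal_find_top_point := by
  intro line_list _hdom hpre
  obtain ⟨hne, hsh⟩ := hpre
  unfold Spec_find_top_point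
  -- the common pair list and its first maximum
  have hpsne : pairsList line_list ≠ [] := by
    cases line_list with
    | nil => exact absurd rfl hne
    | cons l t => simp [pairsList, pairsOf]
  obtain ⟨q, hq⟩ : ∃ q, gBest (pairsList line_list) = some q := by
    cases hg : gBest (pairsList line_list) with
    | none => exact absurd ((gBest_eq_none_iff _).1 hg) hpsne
    | some q => exact ⟨q, rfl⟩
  -- B computes [q.1, q.2]
  have hB : find_top_point_alt line_list = [q.1, q.2] := by
    rw [find_top_point_alt, altFold_eq line_list none hsh, foldl_altStep' _ none, hq]
    rfl
  -- A computes [q.1, q.2]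
  obtain ⟨pre, suf, hps, hpre, hsuf⟩ := gBest_spec _ q hq
  have hx : (pairsList line_list).map Prod.fst
      = pre.map Prod.fst ++ q.1 :: suf.map Prod.fst := by simp [hps]
  have hz : (pairsList line_list).map Prod.snd
      = pre.map Prod.snd ++ q.2 :: suf.map Prod.snd := by simp [hps]
  have hqz_mem : q.2 ∈ (pairsList line_list).map Prod.snd := by
    rw [hz]; exact List.mem_append_right _ (List.mem_cons_self ..)
  have hall : ∀ y ∈ (pairsList line_list).map Prod.snd, y ≤ q.2 := by
    intro y hy
    rw [hz] at hy
    rcases List.mem_append.1 hy with hy | hy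
    · obtain ⟨r, hr, rfl⟩ := List.mem_map.1 hy
      exact le_of_lt (hpre r hr)
    · rcases List.mem_cons.1 hy with rfl | hy
      · exact le_refl _
      · obtain ⟨r, hr, rfl⟩ := List.mem_map.1 hy
        exact hsuf r hr
  -- max(z_list) = q.2
  obtain ⟨m, hm⟩ : ∃ m, PySem.List.max? ((pairsList line_list).map Prod.snd) (fun z => z) = some m := by
    cases hmx : PySem.List.max? ((pairsList line_list).map Prod.snd) (fun z => z) with
    | none =>
      rw [PySem.List.max?_eq_none_iff] at hmx
      simp [hmx] at hqz_mem
    | some m => exact ⟨m, rfl⟩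
  have hmq : m = q.2 := by
    have h1 := PySem.List.max?_isMax hm q.2 hqz_mem
    have h2 := hall m (PySem.List.max?_mem hm)
    omega
  -- z_list.index(q.2) = pre.length
  have hidx : PySem.List.index? ((pairsList line_list).map Prod.snd) q.2 = some pre.length := by
    rw [PySem.List.index?_eq_some_iff]
    refine ⟨pre.map Prod.snd, suf.map Prod.snd, hz, by simp, ?_⟩
    intro hmem
    obtain ⟨r, hr, hr2⟩ := List.mem_map.1 hmem
    exact absurd hr2 (ne_of_lt (hpre r hr))
  -- the two final reads
  have hgx : PySem.List.pyGet? ((pairsList line_list).map Prod.fst) (pre.length : Int) = some q.1 := by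
    have hlen : (pre.map Prod.fst).length = pre.length := List.length_map ..
    rw [hx, ← hlen]
    exact PySem.List.pyGet?_append_length ..
  have hgz : PySem.List.pyGet? ((pairsList line_list).map Prod.snd) (pre.length : Int) = some q.2 := by
    have hlen : (pre.map Prod.snd).length = pre.length := List.length_map ..
    rw [hz, ← hlen]
    exact PySem.List.pyGet?_append_length ..
  simp only [find_top_point, buildLists_eq line_list hsh, hm, hmq, hidx, hgx, hgz, hB]
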